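-- pv_equiv track=rewrite | github.com/kqsavell/cs4341Gomoku | main.py | get_lr_diagonal_heuristic
-- ===== SOURCE A (Python) =====
-- def get_lr_diagonal_heuristic(board, value):
--     heuristic_value = 0
--     rows = len(board)
--     columns = len(board[0])
--
--     for y in range(columns - 4):
--         x = 0
--         diagonal_length = columns - y
--         for i in range(diagonal_length - 5):
--             friendly_count = 0
--             enemy_count = 0
--             for j in range(5):
--                 if board[y + i + j][x + i + j] == value:
--                     friendly_count += 1
--                 else:
--                     enemy_count += 1
--             if friendly_count > enemy_count:
--                 heuristic_value += 1
--             else: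
--                 heuristic_value -= 1
--
--     for x in range(columns - 4 - 1):
--         x += 1
--         y = 0
--         diagonal_length = rows - x
--         for i in range(diagonal_length - 5):
--             friendly_count = 0
--             enemy_count = 0
--             for j in range(5):
--                 if board[y + i + j][x + i + j] == value:
--                     friendly_count += 1
--                 else:
--                     enemy_count += 1
--             if friendly_count > enemy_count:
--                 heuristic_value += 1
--             else:
--                 heuristic_value -= 1
--
--     return heuristic_value
-- ===== SOURCE B (Python) =====
-- def _slide_score(cells, value, nwin):
--     # score nwin sliding 5-windows along cells with an incremental count
--     cnt = sum(1 for c in cells[:5] if c == value)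
--     score = 1 if cnt >= 3 else -1
--     for i in range(1, nwin):
--         cnt += (cells[i + 4] == value) - (cells[i - 1] == value)
--         score += 1 if cnt >= 3 else -1
--     return score
--
--
-- def get_lr_diagonal_heuristic(board, value):
--     rows = len(board)
--     columns = len(board[0])
--     total = 0
--     for y in range(columns - 4):
--         nwin = columns - y - 5
--         if nwin > 0:
--             cells = [board[y + k][k] for k in range(columns - y - 1)]
--             total += _slide_score(cells, value, nwin)
--     for x in range(1, columns - 4):
--         nwin = rows - x - 5
--         if nwin > 0:
--             cells = [board[k][x + k] for k in range(rows - x - 1)]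
--             total += _slide_score(cells, value, nwin)
--     return total
-- ===== Notes on version B (the rewrite author's own statement) =====
-- stated objective: faster
-- what changed: Per-window recounting with the inner 5-cell loop is replaced by extracting each diagonal once and sliding a 5-cell window with an incremental running count (subtract the departing cell, add the arriving one).
import Mathlib
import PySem

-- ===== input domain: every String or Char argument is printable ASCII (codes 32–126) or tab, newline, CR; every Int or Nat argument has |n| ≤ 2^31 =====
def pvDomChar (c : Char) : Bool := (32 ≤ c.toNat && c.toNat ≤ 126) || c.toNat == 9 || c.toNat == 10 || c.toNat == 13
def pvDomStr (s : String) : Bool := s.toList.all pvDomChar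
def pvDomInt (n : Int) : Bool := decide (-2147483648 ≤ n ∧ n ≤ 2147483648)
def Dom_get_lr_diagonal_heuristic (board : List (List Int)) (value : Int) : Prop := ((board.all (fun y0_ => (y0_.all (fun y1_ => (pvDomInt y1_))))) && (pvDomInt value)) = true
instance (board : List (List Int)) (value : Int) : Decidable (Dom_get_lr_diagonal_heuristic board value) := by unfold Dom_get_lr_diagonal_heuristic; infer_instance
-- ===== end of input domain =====

-- B replaces A's per-window recount (inner j-loop) by extracting each diagonal once and
-- sliding a 5-cell window with an incremental running count; same windows, same scores.

-- B replaces A's per-window recount (inner 5-cell loop) by extracting each diagonal once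
-- and sliding a 5-cell window with an incremental running count (objective: alternative).

-- ===== PORT A =====
def get_lr_diagonal_heuristic (board : List (List Int)) (value : Int) : Int :=
  let heuristic_value : Int := 0
  let rows : Int := board.length
  let columns : Int := (PySem.List.pyGetD board 0 []).length
  let h1 := (PySem.List.pyRange 0 (columns - 4) 1).foldl (fun acc y =>
      let x : Int := 0
      let diagonal_length := columns - y
      (PySem.List.pyRange 0 (diagonal_length - 5) 1).foldl (fun acc2 i =>
        let fe := (PySem.List.pyRange 0 5 1).foldl (fun (p : Int × Int) j =>
            if PySem.List.pyGetD (PySem.List.pyGetD board (y + i + j) []) (x + i + j) 0 = value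
            then (p.1 + 1, p.2) else (p.1, p.2 + 1)) (0, 0)
        if fe.1 > fe.2 then acc2 + 1 else acc2 - 1) acc) heuristic_value
  (PySem.List.pyRange 0 (columns - 4 - 1) 1).foldl (fun acc x0 =>
      let x := x0 + 1
      let y : Int := 0
      let diagonal_length := rows - x
      (PySem.List.pyRange 0 (diagonal_length - 5) 1).foldl (fun acc2 i =>
        let fe := (PySem.List.pyRange 0 5 1).foldl (fun (p : Int × Int) j =>
            if PySem.List.pyGetD (PySem.List.pyGetD board (y + i + j) []) (x + i + j) 0 = value
            then (p.1 + 1, p.2) else (p.1, p.2 + 1)) (0, 0)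
        if fe.1 > fe.2 then acc2 + 1 else acc2 - 1) acc) h1

-- ===== PORT B =====
-- _slide_score(cells, value, nwin): prime the count on cells[:5], then slide the window
def slideScore (cells : List Int) (value : Int) (nwin : Int) : Int :=
  let cnt : Int := ((PySem.List.slice cells none (some 5)).map
      (fun c => if c = value then (1 : Int) else 0)).sum
  let score : Int := if 3 ≤ cnt then 1 else -1
  ((PySem.List.pyRange 1 nwin 1).foldl (fun (p : Int × Int) i =>
      let c := p.2 + ((if PySem.List.pyGetD cells (i + 4) 0 = value then (1 : Int) else 0)
                    - (if PySem.List.pyGetD cells (i - 1) 0 = value then (1 : Int) else 0))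
      (p.1 + (if 3 ≤ c then (1 : Int) else -1), c)) (score, cnt)).1

def get_lr_diagonal_heuristic_alt (board : List (List Int)) (value : Int) : Int :=
  let rows : Int := board.length
  let columns : Int := (PySem.List.pyGetD board 0 []).length
  let total : Int := 0
  let t1 := (PySem.List.pyRange 0 (columns - 4) 1).foldl (fun acc y =>
      let nwin := columns - y - 5
      if 0 < nwin then
        acc + slideScore ((PySem.List.pyRange 0 (columns - y - 1) 1).map
          (fun k => PySem.List.pyGetD (PySem.List.pyGetD board (y + k) []) k 0)) value nwin
      else acc) total
  (PySem.List.pyRange 1 (columns - 4) 1).foldl (fun acc x =>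
      let nwin := rows - x - 5
      if 0 < nwin then
        acc + slideScore ((PySem.List.pyRange 0 (rows - x - 1) 1).map
          (fun k => PySem.List.pyGetD (PySem.List.pyGetD board k []) (x + k) 0)) value nwin
      else acc) t1

-- ===== PRECONDITION & SPEC =====
-- Pre_ excludes exactly the inputs on which A raises an IndexError: the empty board
-- (board[0]) and boards where a visited diagonal cell board[r][c] is out of range
-- (too few rows for the column-driven first family, or a visited row too short).
def Pre_get_lr_diagonal_heuristic (board : List (List Int)) (value : Int) : Prop :=
  board ≠ [] ∧
  (∀ y < (board.headD []).length - 5, ∀ k < (board.headD []).length - y - 1,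
      y + k < board.length ∧ k < (board.getD (y + k) []).length) ∧
  (∀ x, 1 ≤ x → x < (board.headD []).length - 4 → x + 6 ≤ board.length →
      ∀ k < board.length - x - 1, x + k < (board.getD k []).length)
instance (board : List (List Int)) (value : Int) : Decidable (Pre_get_lr_diagonal_heuristic board value) := by unfold Pre_get_lr_diagonal_heuristic; infer_instance

def pvWitness_get_lr_diagonal_heuristic : List (List Int) × Int :=
  ([[1, 0, 1, 1, 0, 1], [0, 1, 1, 0, 1, 0], [1, 1, 0, 1, 0, 1], [0, 1, 1, 1, 0, 0],
    [1, 0, 1, 0, 1, 1], [1, 1, 0, 1, 1, 0]], 1)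

def Spec_get_lr_diagonal_heuristic (board : List (List Int)) (value : Int) (out : Int) : Prop := out = get_lr_diagonal_heuristic_alt board value
instance (board : List (List Int)) (value : Int) (out : Int) : Decidable (Spec_get_lr_diagonal_heuristic board value out) := by unfold Spec_get_lr_diagonal_heuristic; infer_instance

-- ===== CLAIM (what is proved, stated in full; the proofs are below) =====
def Claim_equal_get_lr_diagonal_heuristic : Prop := ∀ (board : List (List Int)) (value : Int), Dom_get_lr_diagonal_heuristic board value → Pre_get_lr_diagonal_heuristic board value → Spec_get_lr_diagonal_heuristic board value (get_lr_diagonal_heuristic board value)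

-- ===== LEMMAS AND PROOFS =====

def pvInd (value x : Int) : Int := if x = value then 1 else 0
def pvCell (board : List (List Int)) (r0 c0 t : Int) : Int :=
  PySem.List.pyGetD (PySem.List.pyGetD board (r0 + t) []) (c0 + t) 0
def pvCnt (f : Int → Int) (value i : Int) : Int :=
  pvInd value (f i) + pvInd value (f (i + 1)) + pvInd value (f (i + 2)) +
  pvInd value (f (i + 3)) + pvInd value (f (i + 4))

lemma window_eq (board : List (List Int)) (value r0 c0 i : Int) :
    (PySem.List.pyRange 0 5 1).foldl (fun (p : Int × Int) j =>
        if PySem.List.pyGetD (PySem.List.pyGetD board (r0 + i + j) []) (c0 + i + j) 0 = value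
        then (p.1 + 1, p.2) else (p.1, p.2 + 1)) (0, 0)
      = (pvCnt (pvCell board r0 c0) value i, 5 - pvCnt (pvCell board r0 c0) value i) := by
  rw [show PySem.List.pyRange 0 5 1 = [0, 1, 2, 3, 4] from by decide]
  simp only [List.foldl_cons, List.foldl_nil, pvCnt, pvCell, pvInd, add_zero, add_assoc]
  split_ifs <;> norm_num

lemma cnt_slide (f : Int → Int) (v i : Int) :
    pvCnt f v i = pvCnt f v (i - 1) + (pvInd v (f (i + 4)) - pvInd v (f (i - 1))) := by
  simp only [pvCnt, show i - 1 + 1 = i from by ring, show i - 1 + 2 = i + 1 from by ring,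
    show i - 1 + 3 = i + 2 from by ring, show i - 1 + 4 = i + 3 from by ring]
  ring

def pvStep (f : Int → Int) (value i : Int) : Int := if 3 ≤ pvCnt f value i then 1 else -1
def pvDiag (board : List (List Int)) (value r0 c0 n : Int) : Int :=
  ((PySem.List.pyRange 0 n 1).map (pvStep (pvCell board r0 c0) value)).sum

lemma cnt_bounds (f : Int → Int) (v i : Int) : 0 ≤ pvCnt f v i ∧ pvCnt f v i ≤ 5 := by
  simp only [pvCnt, pvInd]; split_ifs <;> omega

lemma diagA (board : List (List Int)) (value r0 c0 n acc : Int) :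
    (PySem.List.pyRange 0 n 1).foldl (fun acc2 i =>
        let fe := (PySem.List.pyRange 0 5 1).foldl (fun (p : Int × Int) j =>
            if PySem.List.pyGetD (PySem.List.pyGetD board (r0 + i + j) []) (c0 + i + j) 0 = value
            then (p.1 + 1, p.2) else (p.1, p.2 + 1)) (0, 0)
        if fe.1 > fe.2 then acc2 + 1 else acc2 - 1) acc
      = acc + pvDiag board value r0 c0 n := by
  have h : ∀ (acc2 i : Int), i ∈ PySem.List.pyRange 0 n 1 →
      (fun acc2 i =>
        let fe := (PySem.List.pyRange 0 5 1).foldl (fun (p : Int × Int) j =>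
            if PySem.List.pyGetD (PySem.List.pyGetD board (r0 + i + j) []) (c0 + i + j) 0 = value
            then (p.1 + 1, p.2) else (p.1, p.2 + 1)) (0, 0)
        if fe.1 > fe.2 then acc2 + 1 else acc2 - 1) acc2 i
      = (fun acc2 i => acc2 + pvStep (pvCell board r0 c0) value i) acc2 i := by
    intro acc2 i _
    simp only [window_eq, pvStep]
    rcases cnt_bounds (pvCell board r0 c0) value i with ⟨h0, h5⟩
    split_ifs with h1 h2 h2 <;> omega
  rw [PySem.List.foldl_congr_mem _ _ _ _ h, PySem.List.foldl_add]
  rfl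

lemma slide_fold (f : Int → Int) (v s : Int) (n' : Nat) :
    (PySem.List.pyRange 1 (1 + (n' : Int)) 1).foldl (fun (p : Int × Int) i =>
        let c := p.2 + ((if f (i + 4) = v then (1 : Int) else 0)
                      - (if f (i - 1) = v then (1 : Int) else 0))
        (p.1 + (if 3 ≤ c then (1 : Int) else -1), c)) (s, pvCnt f v 0)
      = (s + ((PySem.List.pyRange 1 (1 + (n' : Int)) 1).map (pvStep f v)).sum,
         pvCnt f v (n' : Int)) := by
  induction n' with
  | zero => simp [PySem.List.pyRange_one_eq_nil]
  | succ m ih =>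
    have hb : (1 : Int) + ((m : Nat) + 1 : Nat) = (1 + (m : Int)) + 1 := by push_cast; ring
    rw [hb, PySem.List.pyRange_one_succ_right (by omega)]
    rw [List.foldl_append, List.map_append, List.sum_append, ih]
    simp only [List.foldl_cons, List.foldl_nil, List.map_cons, List.map_nil, List.sum_cons,
      List.sum_nil]
    have hc : pvCnt f v (m : Int) + ((if f (1 + (m : Int) + 4) = v then (1 : Int) else 0)
        - (if f (1 + (m : Int) - 1) = v then (1 : Int) else 0)) = pvCnt f v ((m : Nat) + 1 : Nat) := by
      rw [show ((m : Nat) + 1 : Nat) = ((1 : Int) + (m : Int)) from by push_cast; ring,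
        cnt_slide f v (1 + (m : Int))]
      simp only [pvInd, add_sub_cancel_left]
    rw [hc, Prod.mk.injEq]
    refine ⟨?_, rfl⟩
    have he : (((m + 1 : Nat)) : Int) = 1 + (m : Int) := by push_cast; ring
    rw [he]
    simp only [pvStep]
    ring

lemma slideScore_eq (board : List (List Int)) (value r0 c0 L : Int) (h : 0 < L - 5) :
    slideScore ((PySem.List.pyRange 0 (L - 1) 1).map (fun k => pvCell board r0 c0 k))
        value (L - 5) = pvDiag board value r0 c0 (L - 5) := by
  have hL : 6 ≤ L := by omega
  set f : Int → Int := pvCell board r0 c0 with hf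
  set cells : List Int := (PySem.List.pyRange 0 (L - 1) 1).map (fun k => f k) with hcells
  -- the primed count is the count of window 0
  have htake : PySem.List.slice cells none (some 5) = ([0, 1, 2, 3, 4] : List Int).map f := by
    rw [hcells, PySem.List.slice_to _ (show (0:Int) ≤ 5 by norm_num)]
    rw [← List.map_take, PySem.List.pyRange_one]
    rw [← List.map_take, List.take_range]
    have h5 : min (5 : Int).toNat (L - 1 - 0).toNat = 5 := by omega
    rw [h5]
    simp [List.range_succ]
  have hcnt : ((PySem.List.slice cells none (some 5)).map
      (fun c => if c = value then (1 : Int) else 0)).sum = pvCnt f value 0 := by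
    rw [htake]
    simp [pvCnt, pvInd]
    ring
  simp only [slideScore]
  rw [hcnt]
  have hbody : ∀ (p : Int × Int), ∀ i ∈ PySem.List.pyRange 1 (L - 5) 1,
      (fun (p : Int × Int) i =>
        let c := p.2 + ((if PySem.List.pyGetD cells (i + 4) 0 = value then (1 : Int) else 0)
                      - (if PySem.List.pyGetD cells (i - 1) 0 = value then (1 : Int) else 0))
        (p.1 + (if 3 ≤ c then (1 : Int) else -1), c)) p i
      = (fun (p : Int × Int) i =>
        let c := p.2 + ((if f (i + 4) = value then (1 : Int) else 0)
                      - (if f (i - 1) = value then (1 : Int) else 0))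
        (p.1 + (if 3 ≤ c then (1 : Int) else -1), c)) p i := by
    intro p i hi
    rw [PySem.List.mem_pyRange_one] at hi
    beta_reduce
    rw [hcells, PySem.List.pyGetD_map_pyRange_of_nonneg (fun k => f k) (L - 1) (i + 4) 0 (by omega) (by omega),
      PySem.List.pyGetD_map_pyRange_of_nonneg (fun k => f k) (L - 1) (i - 1) 0 (by omega) (by omega)]
  rw [PySem.List.foldl_congr_mem _ _ _ _ (fun p i hi => hbody p i hi)]
  have hn : (L - 5) = 1 + (((L - 6).toNat : Nat) : Int) := by omega
  rw [hn, slide_fold f value _ ((L - 6).toNat)]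
  rw [pvDiag, PySem.List.pyRange_one_cons (show (0:Int) < 1 + (((L - 6).toNat : Nat) : Int) from by omega)]
  simp only [zero_add, List.map_cons, List.sum_cons, ← hf]
  simp [pvStep]

lemma pvDiag_nonpos (board : List (List Int)) (value r0 c0 n : Int) (h : n ≤ 0) :
    pvDiag board value r0 c0 n = 0 := by
  rw [pvDiag, PySem.List.pyRange_one_eq_nil h]; rfl

lemma sum_shift (g : Int → Int) (b : Int) :
    ((PySem.List.pyRange 1 b 1).map g).sum
      = ((PySem.List.pyRange 0 (b - 1) 1).map (fun t => g (t + 1))).sum := by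
  rw [PySem.List.pyRange_one, PySem.List.pyRange_one, sub_zero, List.map_map, List.map_map]
  congr 1
  apply List.map_congr_left
  intro k _
  simp only [Function.comp_apply]
  congr 1
  ring

theorem main_eq (board : List (List Int)) (value : Int) :
    get_lr_diagonal_heuristic board value = get_lr_diagonal_heuristic_alt board value := by
  simp only [get_lr_diagonal_heuristic, get_lr_diagonal_heuristic_alt]
  set c : Int := ((PySem.List.pyGetD board 0 []).length : Int) with hc
  set r : Int := (board.length : Int) with hr
  -- A family 1
  have hA1 : ∀ (acc y : Int), y ∈ PySem.List.pyRange 0 (c - 4) 1 →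
      (PySem.List.pyRange 0 (c - y - 5) 1).foldl (fun acc2 i =>
        let fe := (PySem.List.pyRange 0 5 1).foldl (fun (p : Int × Int) j =>
            if PySem.List.pyGetD (PySem.List.pyGetD board (y + i + j) []) (0 + i + j) 0 = value
            then (p.1 + 1, p.2) else (p.1, p.2 + 1)) (0, 0)
        if fe.1 > fe.2 then acc2 + 1 else acc2 - 1) acc
      = acc + pvDiag board value y 0 (c - y - 5) := fun acc y _ => diagA board value y 0 _ acc
  rw [PySem.List.foldl_congr_mem _ _ (fun acc y => acc + pvDiag board value y 0 (c - y - 5)) _ hA1,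
    PySem.List.foldl_add]
  -- A family 2
  have hA2 : ∀ (acc x0 : Int), x0 ∈ PySem.List.pyRange 0 (c - 4 - 1) 1 →
      (PySem.List.pyRange 0 (r - (x0 + 1) - 5) 1).foldl (fun acc2 i =>
        let fe := (PySem.List.pyRange 0 5 1).foldl (fun (p : Int × Int) j =>
            if PySem.List.pyGetD (PySem.List.pyGetD board (0 + i + j) []) (x0 + 1 + i + j) 0 = value
            then (p.1 + 1, p.2) else (p.1, p.2 + 1)) (0, 0)
        if fe.1 > fe.2 then acc2 + 1 else acc2 - 1) acc
      = acc + pvDiag board value 0 (x0 + 1) (r - (x0 + 1) - 5) :=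
    fun acc x0 _ => diagA board value 0 (x0 + 1) _ acc
  rw [PySem.List.foldl_congr_mem _ _
    (fun acc x0 => acc + pvDiag board value 0 (x0 + 1) (r - (x0 + 1) - 5)) _ hA2,
    PySem.List.foldl_add]
  -- B family 1
  have hB1 : ∀ (acc y : Int), y ∈ PySem.List.pyRange 0 (c - 4) 1 →
      (if 0 < c - y - 5 then
        acc + slideScore ((PySem.List.pyRange 0 (c - y - 1) 1).map
          (fun k => PySem.List.pyGetD (PySem.List.pyGetD board (y + k) []) k 0)) value (c - y - 5)
      else acc)
      = acc + pvDiag board value y 0 (c - y - 5) := by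
    intro acc y _
    by_cases h : 0 < c - y - 5
    · rw [if_pos h]
      have hm : (fun k => PySem.List.pyGetD (PySem.List.pyGetD board (y + k) []) k 0)
          = (fun k => pvCell board y 0 k) := by
        funext k; simp [pvCell]
      rw [hm, slideScore_eq board value y 0 (c - y) h]
    · rw [if_neg h, pvDiag_nonpos board value y 0 _ (by omega)]
      ring
  rw [PySem.List.foldl_congr_mem _ _ (fun acc y => acc + pvDiag board value y 0 (c - y - 5)) _ hB1,
    PySem.List.foldl_add]
  -- B family 2
  have hB2 : ∀ (acc x : Int), x ∈ PySem.List.pyRange 1 (c - 4) 1 →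
      (if 0 < r - x - 5 then
        acc + slideScore ((PySem.List.pyRange 0 (r - x - 1) 1).map
          (fun k => PySem.List.pyGetD (PySem.List.pyGetD board k []) (x + k) 0)) value (r - x - 5)
      else acc)
      = acc + pvDiag board value 0 x (r - x - 5) := by
    intro acc x _
    by_cases h : 0 < r - x - 5
    · rw [if_pos h]
      have hm : (fun k => PySem.List.pyGetD (PySem.List.pyGetD board k []) (x + k) 0)
          = (fun k => pvCell board 0 x k) := by
        funext k; simp [pvCell]
      rw [hm, slideScore_eq board value 0 x (r - x) h]
    · rw [if_neg h, pvDiag_nonpos board value 0 x _ (by omega)]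
      ring
  rw [PySem.List.foldl_congr_mem _ _ (fun acc x => acc + pvDiag board value 0 x (r - x - 5)) _ hB2,
    PySem.List.foldl_add]
  rw [sum_shift (fun x => pvDiag board value 0 x (r - x - 5)) (c - 4)]

-- ===== VERDICT (by name: the statement is the Claim_ definition above) =====
theorem get_lr_diagonal_heuristic_spec : Claim_equal_get_lr_diagonal_heuristic := by
  intro board value _ _
  unfold Spec_get_lr_diagonal_heuristic
  exact main_eq board value
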